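-- pv_equiv track=rewrite | github.com/heathhenley/AOC23 | day14/14.py | process_column
-- ===== SOURCE A (Python) =====
-- def process_column(col: list) -> str:
--   # plan:
--   # find the next '#' in the column
--   # count "O" between next and last "#" (or start)
--   # update the last '# pointer to the current '#'
--   last = -1
--   current = col.index('#') if "#" in col else len(col)
--   weight = 0
--   while last != len(col):
--     if last == -1:
--       count_o = col[:current].count('O')
--     else:
--       count_o = col[last:current].count('O')
--     for idx in range(count_o):
--       weight += len(col) - (last + idx + 1)
--     last = current
--     current = col.index('#', last + 1) if "#" in col[last + 1:] else len(col)
--   return weight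
-- ===== SOURCE B (Python) =====
-- def process_column(col: list) -> str:
--   # one left-to-right pass: 'avail' is the next landing slot for a rolled rock
--   n = len(col)
--   avail = 0
--   weight = 0
--   for i, c in enumerate(col):
--     if c == '#':
--       avail = i + 1
--     elif c == 'O':
--       weight += n - avail
--       avail += 1
--   return weight
-- ===== Notes on version B (the rewrite author's own statement) =====
-- stated objective: alternative
-- what changed: Replaced A's per-'#'-segment while loop (repeated index/slice/count scans plus an inner per-rock weight loop) by a single left-to-right enumerate pass that tracks the next landing slot and adds each rock's weight directly.
import Mathlib
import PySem

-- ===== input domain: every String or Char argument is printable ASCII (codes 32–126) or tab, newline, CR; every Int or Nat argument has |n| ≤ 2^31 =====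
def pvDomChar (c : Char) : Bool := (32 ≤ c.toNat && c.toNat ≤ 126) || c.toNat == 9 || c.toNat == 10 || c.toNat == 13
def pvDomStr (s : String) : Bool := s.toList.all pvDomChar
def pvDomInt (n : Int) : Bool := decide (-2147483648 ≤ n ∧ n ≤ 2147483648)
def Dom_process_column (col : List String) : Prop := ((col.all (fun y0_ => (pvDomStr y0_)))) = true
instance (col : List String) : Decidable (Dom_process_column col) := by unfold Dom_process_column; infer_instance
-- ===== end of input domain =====

-- B replaces A's per-'#'-segment scan (repeated index/slice/count passes plus an inner
-- per-rock loop) by a single left-to-right pass tracking the next landing slot.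

-- ===== PORT A =====
-- A's 'while last != len(col)' loop, ported with fuel (col.length + 1 bounds the iterations:
-- 'last' jumps to the next '#' or to len(col) each time, strictly increasing)
def pcLoopA (col : List String) (fuel : Nat) (last current weight : Int) : Int :=
  match fuel with
  | 0 => weight
  | fuel + 1 =>
    if last = PySem.List.len col then weight
    else
      -- body inlined in evaluation order: count_o, then the inner
      -- 'for idx in range(count_o): weight += len(col) - (last + idx + 1)' loop,
      -- then last = current, then
      -- 'col.index('#', last + 1) if "#" in col[last + 1:] else len(col)'
      pcLoopA col fuel current
        (match PySem.List.index? (PySem.List.slice col (some (current + 1)) none) "#" with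
         | some k => current + 1 + (k : Int)
         | none => PySem.List.len col)
        ((PySem.List.pyRange 0
            (((if last = -1 then PySem.List.count (PySem.List.slice col none (some current)) "O"
               else PySem.List.count (PySem.List.slice col (some last) (some current)) "O") : Nat) : Int) 1).foldl
          (fun w idx => w + (PySem.List.len col - (last + idx + 1))) weight)

def process_column (col : List String) : Int :=
  -- 'col.index('#') if "#" in col else len(col)'
  let current : Int := match PySem.List.index? col "#" with
    | some k => (k : Int)
    | none => PySem.List.len col
  pcLoopA col (col.length + 1) (-1) current 0

-- ===== PORT B =====
def process_column_alt (col : List String) : Int :=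
  let n : Int := PySem.List.len col
  ((PySem.List.enumerate col 0).foldl
    (fun (st : Int × Int) (ic : Int × String) =>
      if ic.2 = "#" then (ic.1 + 1, st.2)
      else if ic.2 = "O" then (st.1 + 1, st.2 + (n - st.1))
      else st)
    (0, 0)).2

-- ===== PRECONDITION & SPEC =====
def Spec_process_column (col : List String) (out : Int) : Prop := out = process_column_alt col
instance (col : List String) (out : Int) : Decidable (Spec_process_column col out) := by unfold Spec_process_column; infer_instance

-- ===== CLAIM (what is proved, stated in full; the proofs are below) =====
def Claim_equal_process_column : Prop := ∀ (col : List String), Dom_process_column col → Spec_process_column col (process_column col)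

-- ===== LEMMAS AND PROOFS =====

-- weight of k rocks landing at slots a, a+1, …, a+k-1 in a column of height n
def sumO (k : Nat) (n a : Int) : Int :=
  ((List.range k).map (fun idx : Nat => n - a - (idx : Int))).sum

-- canonical value: process suffix s, current position pos, next landing slot avail
def pcF (s : List String) (n pos avail : Int) : Int :=
  match s with
  | [] => 0
  | c :: t =>
    if c = "#" then pcF t n (pos + 1) (pos + 1)
    else if c = "O" then (n - avail) + pcF t n (pos + 1) (avail + 1)
    else pcF t n (pos + 1) avail

-- position of the first '#' at index ≥ j, or len(col)
def nextH (col : List String) (j : Nat) : Int :=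
  match PySem.List.index? (col.drop j) "#" with
  | some k => (j : Int) + (k : Int)
  | none => (col.length : Int)

theorem sumO_succ (k : Nat) (n a : Int) :
    sumO (k + 1) n a = (n - a) + sumO k n (a + 1) := by
  simp only [sumO, List.range_succ_eq_map, List.map_cons, List.map_map, List.sum_cons]
  congr 1
  · push_cast; ring
  · apply congrArg
    apply List.map_congr_left
    intro j _
    simp [Function.comp]
    ring

theorem pcF_nohash (s : List String) (h : "#" ∉ s) (n pos avail : Int) :
    pcF s n pos avail = sumO (s.count "O") n avail := by
  induction s generalizing pos avail with
  | nil => simp [pcF, sumO]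
  | cons c t ih =>
    have hc : c ≠ "#" := fun hh => h (hh ▸ List.mem_cons_self ..)
    have ht : "#" ∉ t := fun hh => h (List.mem_cons_of_mem _ hh)
    by_cases hO : c = "O"
    · subst hO
      simp [pcF, hc, ih ht, sumO_succ]
    · simp [pcF, hc, hO, ih ht]

theorem pcF_append_nohash (s t : List String) (h : "#" ∉ s) (n pos avail : Int) :
    pcF (s ++ "#" :: t) n pos avail =
      sumO (s.count "O") n avail + pcF t n (pos + s.length + 1) (pos + s.length + 1) := by
  induction s generalizing pos avail with
  | nil => simp [pcF, sumO]
  | cons c s ih =>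
    have hc : c ≠ "#" := fun hh => h (hh ▸ List.mem_cons_self ..)
    have hs : "#" ∉ s := fun hh => h (List.mem_cons_of_mem _ hh)
    by_cases hO : c = "O"
    · subst hO
      rw [List.cons_append]
      simp only [pcF, if_neg hc, if_true]
      rw [ih hs]
      simp only [List.count_cons_self, List.length_cons, sumO_succ]
      push_cast; ring_nf
    · rw [List.cons_append]
      simp only [pcF, if_neg hc, if_neg hO]
      rw [ih hs]
      simp only [List.count_cons, beq_iff_eq, if_neg hO, List.length_cons]
      push_cast; ring_nf

-- A's inner 'for idx in range(count_o)' loop is sumO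
theorem innerSum (k : Nat) (n last w : Int) :
    (PySem.List.pyRange 0 (k : Int) 1).foldl (fun w idx => w + (n - (last + idx + 1))) w
      = w + sumO k n (last + 1) := by
  rw [PySem.List.foldl_add]
  have h1 : PySem.List.pyRange 0 (k : Int) 1 = (List.range k).map (fun j : Nat => (j : Int)) := by
    rw [PySem.List.pyRange_one]
    simp
  rw [h1, List.map_map]
  congr 1
  unfold sumO
  apply congrArg
  apply List.map_congr_left
  intro j _
  simp [Function.comp]
  ring

theorem pcLoopA_len (col : List String) (fuel : Nat) (current weight : Int) :
    pcLoopA col fuel (PySem.List.len col) current weight = weight := by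
  cases fuel <;> simp [pcLoopA]

-- main A-side invariant: from state last = j-1 (j = 0 or col[j-1] = '#'), current = next '#'
theorem pcLoopA_spec (col : List String) (fuel : Nat) :
    ∀ (j : Nat) (weight : Int), j ≤ col.length →
      (col.drop j).count "#" < fuel →
      (j ≠ 0 → col[j-1]? = some "#") →
      pcLoopA col fuel ((j : Int) - 1) (nextH col j) weight
        = weight + pcF (col.drop j) (col.length : Int) (j : Int) (j : Int) := by
  induction fuel with
  | zero => intro j w _ hf _; omega
  | succ fuel ih =>
    intro j w hj hf hinv
    have hlen : PySem.List.len col = (col.length : Int) := PySem.List.len_eq col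
    have hne : ((j : Int) - 1) ≠ PySem.List.len col := by rw [hlen]; omega
    rw [pcLoopA, if_neg hne]
    cases hidx : PySem.List.index? (col.drop j) "#" with
    | none =>
      have hnm : "#" ∉ col.drop j := (PySem.List.index?_eq_none_iff ..).mp hidx
      have hnext : nextH col j = (col.length : Int) := by unfold nextH; rw [hidx]
      rw [hnext]
      -- the counted segment is exactly col.drop j (a leading '#' at j-1 adds no 'O')
      have hcnt :
          (if ((j : Int) - 1) = -1 then
            PySem.List.count (PySem.List.slice col none (some (col.length : Int))) "O"
          else PySem.List.count (PySem.List.slice col (some ((j : Int) - 1)) (some (col.length : Int))) "O")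
          = (col.drop j).count "O" := by
        by_cases hj0 : j = 0
        · subst hj0
          rw [if_pos (by omega)]
          simp [PySem.List.count_eq, PySem.List.slice_to_natCast]
        · rw [if_neg (by omega)]
          obtain ⟨hjl, hget⟩ := List.getElem?_eq_some_iff.mp (hinv hj0)
          have hcast : ((j : Int) - 1) = ((j - 1 : Nat) : Int) := by omega
          rw [hcast, PySem.List.slice_natCast]
          have htake : (col.drop (j-1)).take ((col.length - (j-1) : Nat)) = col.drop (j-1) := by
            apply List.take_of_length_le
            simp
          rw [htake, List.drop_eq_getElem_cons hjl, hget,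
            show j - 1 + 1 = j by omega]
          simp [PySem.List.count_eq]
      rw [hcnt, innerSum, show (j : Int) - 1 + 1 = (j : Int) by ring]
      have hslice : PySem.List.slice col (some ((col.length : Int) + 1)) none = [] := by
        rw [show ((col.length : Int) + 1) = ((col.length + 1 : Nat) : Int) by push_cast; ring,
          PySem.List.slice_from_natCast]
        simp
      rw [hslice]
      have hidx2 : PySem.List.index? ([] : List String) "#" = none := by
        rw [PySem.List.index?_eq_none_iff]; simp
      rw [hidx2]
      rw [← hlen]
      rw [pcLoopA_len]
      rw [pcF_nohash _ hnm]
    | some k =>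
      obtain ⟨pre, suf, hdec, hklen, hnpre⟩ := (PySem.List.index?_eq_some_iff ..).mp hidx
      have hdl : (col.drop j).length = col.length - j := List.length_drop ..
      have hkd : k < (col.drop j).length := by rw [hdec]; simp [← hklen]
      have hjk : j + k < col.length := by omega
      have hnext : nextH col j = ((j + k : Nat) : Int) := by
        unfold nextH; rw [hidx]; push_cast; ring
      rw [hnext]
      have hcnt :
          (if ((j : Int) - 1) = -1 then
            PySem.List.count (PySem.List.slice col none (some ((j + k : Nat) : Int))) "O"
          else PySem.List.count (PySem.List.slice col (some ((j : Int) - 1)) (some ((j + k : Nat) : Int))) "O")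
          = pre.count "O" := by
        by_cases hj0 : j = 0
        · subst hj0
          rw [if_pos (by omega)]
          rw [PySem.List.slice_to_natCast]
          simp only [PySem.List.count_eq]
          rw [show (0 + k) = pre.length by omega]
          rw [show col.take pre.length = pre by
            conv_lhs => rw [show col = pre ++ "#" :: suf from by rw [← hdec]; simp]
            exact List.take_left ..]
        · rw [if_neg (by omega)]
          obtain ⟨hjl, hget⟩ := List.getElem?_eq_some_iff.mp (hinv hj0)
          have hcast : ((j : Int) - 1) = ((j - 1 : Nat) : Int) := by omega
          rw [hcast, PySem.List.slice_natCast]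
          have h1 : j + k - (j - 1) = k + 1 := by omega
          rw [h1, List.drop_eq_getElem_cons hjl, hget, show j - 1 + 1 = j by omega, hdec,
            List.take_succ_cons, ← hklen, List.take_left]
          simp [PySem.List.count_eq]
      rw [hcnt, innerSum, show (j : Int) - 1 + 1 = (j : Int) by ring]
      have hsuf : col.drop (j + k + 1) = suf := by
        rw [show j + k + 1 = j + (k + 1) by omega, ← List.drop_drop, hdec, ← hklen,
          show pre.length + 1 = (pre ++ ["#"]).length by simp,
          show pre ++ "#" :: suf = (pre ++ ["#"]) ++ suf from by simp]
        exact List.drop_left ..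
      have hslice : PySem.List.slice col (some (((j + k : Nat) : Int) + 1)) none = suf := by
        rw [show (((j + k : Nat) : Int) + 1) = ((j + k + 1 : Nat) : Int) by push_cast; ring,
          PySem.List.slice_from_natCast, hsuf]
      rw [hslice]
      have harg1 : ((j + k : Nat) : Int) = ((j + k + 1 : Nat) : Int) - 1 := by push_cast; ring
      have harg2 : (match PySem.List.index? suf "#" with
          | some k' => ((j + k : Nat) : Int) + 1 + (k' : Int)
          | none => PySem.List.len col) = nextH col (j + k + 1) := by
        unfold nextH
        rw [hsuf, hlen]
        cases PySem.List.index? suf "#" with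
        | none => rfl
        | some k' => push_cast; ring
      rw [harg2, harg1, ih (j + k + 1) _ (by omega)
        (by rw [hsuf]; have : (col.drop j).count "#" < fuel + 1 := hf
            rw [hdec, List.count_append, List.count_cons] at this; simp at this; omega)
        (by intro _
            rw [show j + k + 1 - 1 = j + k by omega]
            rw [show col[j+k]? = (col.drop j)[k]? from by rw [List.getElem?_drop]
            , hdec, ← hklen]
            simp)]
      rw [hsuf, hlen, hdec, pcF_append_nohash _ _ hnpre, hklen]
      push_cast
      ring

theorem pcB_spec (n : Int) :
    ∀ (s : List String) (i avail weight : Int),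
      ((PySem.List.enumerate s i).foldl
        (fun (st : Int × Int) (ic : Int × String) =>
          if ic.2 = "#" then (ic.1 + 1, st.2)
          else if ic.2 = "O" then (st.1 + 1, st.2 + (n - st.1))
          else st) (avail, weight)).2
      = weight + pcF s n i avail := by
  intro s
  induction s with
  | nil => intro i avail w; simp [pcF, PySem.List.enumerate_nil]
  | cons c t ih =>
    intro i avail w
    rw [PySem.List.enumerate_cons, List.foldl_cons]
    by_cases hH : c = "#"
    · rw [if_pos hH, ih]
      simp [pcF, hH]
    · by_cases hO : c = "O"
      · rw [if_neg hH, if_pos hO, ih]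
        have : pcF (c :: t) n i avail = (n - avail) + pcF t n (i + 1) (avail + 1) := by
          simp [pcF, hO]
        rw [this]; ring
      · rw [if_neg hH, if_neg hO, ih]
        simp [pcF, hH, hO]

-- ===== VERDICT (by name: the statement is the Claim_ definition above) =====
theorem process_column_spec : Claim_equal_process_column := by
  unfold Claim_equal_process_column
  intro col _
  unfold Spec_process_column process_column process_column_alt
  rw [pcB_spec (PySem.List.len col) col 0 0 0]
  have hinit : (match PySem.List.index? col "#" with
      | some k => (k : Int)
      | none => PySem.List.len col) = nextH col 0 := by
    unfold nextH
    rw [List.drop_zero, PySem.List.len_eq]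
    cases PySem.List.index? col "#" with
    | none => rfl
    | some k => simp
  rw [hinit, show (-1 : Int) = ((0 : Nat) : Int) - 1 by simp,
    pcLoopA_spec col (col.length + 1) 0 0 (by omega)
      (by have := List.count_le_length (l := col.drop 0) (a := "#"); simp at this ⊢; omega)
      (by intro h; omega)]
  rw [List.drop_zero, PySem.List.len_eq]
  simp
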